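-- pv_equiv track=rewrite | github.com/JPZEBRA/python_study_case | png16debayer.py | shift_max
-- ===== SOURCE A (Python) =====
-- def shift_max(data) :
--
--         buffer = []
--         pw = max(data)
--         dpos = 0
--
--         for sf in range(0,8) :
--                 if pw<256 :
--                         break
--                 pw = pw >> 1
--
--         for i in range(len(data)//4) :
--                 alp = data[dpos]
--                 dpos = dpos + 1
--                 red = data[dpos]>>sf
--                 dpos = dpos + 1
--                 grn = data[dpos]>>sf
--                 dpos = dpos + 1
--                 blu = data[dpos]>>sf
--                 dpos = dpos + 1
--                 buffer.append((red,grn,blu,alp))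
--
--         return buffer
-- ===== SOURCE B (Python) =====
-- def shift_max(data):
--     pw = max(data)
--     sf = 0 if pw < 256 else min(7, pw.bit_length() - 8)
--     alphas = data[0::4]
--     reds = data[1::4]
--     grns = data[2::4]
--     blus = data[3::4]
--     return [(r >> sf, g >> sf, b >> sf, a)
--             for r, g, b, a in zip(reds, grns, blus, alphas)]
-- ===== Notes on version B (the rewrite author's own statement) =====
-- stated objective: alternative
-- what changed: The halving loop for the shift factor is replaced by a closed form (0 if max < 256 else min(7, max.bit_length() - 8)), and the indexed quad-building loop is replaced by zipping the four strided column slices data[1::4], data[2::4], data[3::4], data[0::4].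
-- outside the precondition, e.g. on shift_max([]): A raises ValueError, B raises ValueError
import Mathlib
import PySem

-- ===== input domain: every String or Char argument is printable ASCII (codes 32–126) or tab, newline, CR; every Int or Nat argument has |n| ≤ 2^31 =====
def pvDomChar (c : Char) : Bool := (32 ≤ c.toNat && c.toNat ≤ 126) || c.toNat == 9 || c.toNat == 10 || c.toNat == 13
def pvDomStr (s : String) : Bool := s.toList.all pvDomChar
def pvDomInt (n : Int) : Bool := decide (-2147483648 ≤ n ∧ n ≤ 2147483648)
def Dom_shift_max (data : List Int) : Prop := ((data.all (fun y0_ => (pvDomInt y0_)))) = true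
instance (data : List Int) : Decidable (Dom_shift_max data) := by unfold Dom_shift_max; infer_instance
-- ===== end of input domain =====

-- B replaces A's halving loop by a closed-form shift (bit_length) and the indexed quad loop by
-- zipping the four strided column slices; equivalence of return values is proved for data ≠ [].

-- ===== PORT A =====
-- 'for sf in range(0,8): if pw < 256: break; pw = pw >> 1' — recursion over the range list so the
-- break and the final value of the loop variable sf are modelled exactly; returns (pw, sf).
def sfLoopA (pw sfcur : Int) : List Int → Int × Int
  | [] => (pw, sfcur)
  | sf :: rest => if pw < 256 then (pw, sf) else sfLoopA (pw >>> (1:Nat)) sf rest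

-- one iteration of A's quad loop: reads data[dpos..dpos+3] and appends (red,grn,blu,alp);
-- sf comes from range(0,8) so sf ≥ 0 and '>> sf' is exactly '>>> sf.toNat'.
def quadStepA (data : List Int) (sf : Int)
    (st : Int × List (Int × Int × Int × Int)) (_ : Int) :
    Int × List (Int × Int × Int × Int) :=
  let dpos := st.1
  let alp := PySem.List.pyGetD data dpos 0
  let red := PySem.List.pyGetD data (dpos + 1) 0 >>> sf.toNat
  let grn := PySem.List.pyGetD data (dpos + 2) 0 >>> sf.toNat
  let blu := PySem.List.pyGetD data (dpos + 3) 0 >>> sf.toNat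
  (dpos + 4, st.2 ++ [(red, grn, blu, alp)])

-- max(data) raises ValueError on []: excluded by Pre_shift_max, the .getD 0 default is never used there
def shift_max (data : List Int) : List (Int × Int × Int × Int) :=
  let pw := (PySem.List.max? data (fun x => x)).getD 0
  let sf := (sfLoopA pw 0 (PySem.List.pyRange 0 8 1)).2
  ((PySem.List.pyRange 0 (PySem.Int.floordiv (data.length : Int) 4) 1).foldl
    (quadStepA data sf) (0, [])).2

-- ===== PORT B =====
def shift_max_alt (data : List Int) : List (Int × Int × Int × Int) :=
  let pw := (PySem.List.max? data (fun x => x)).getD 0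
  let sf : Int := if pw < 256 then 0 else min 7 ((PySem.Int.bitLength pw : Int) - 8)
  let alphas := (PySem.List.slice? data (some 0) none 4).getD []
  let reds := (PySem.List.slice? data (some 1) none 4).getD []
  let grns := (PySem.List.slice? data (some 2) none 4).getD []
  let blus := (PySem.List.slice? data (some 3) none 4).getD []
  (reds.zip (grns.zip (blus.zip alphas))).map
    (fun x => ((x.1 : Int) >>> sf.toNat, (x.2.1 : Int) >>> sf.toNat, (x.2.2.1 : Int) >>> sf.toNat, x.2.2.2))

-- ===== PRECONDITION & SPEC =====
-- max(data) raises ValueError on the empty list; everything else returns normally.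
def Pre_shift_max (data : List Int) : Prop := data ≠ []
instance (data : List Int) : Decidable (Pre_shift_max data) := by unfold Pre_shift_max; infer_instance
def pvWitness_shift_max : List Int := [300, 999, 2, 3]

def Spec_shift_max (data : List Int) (out : List (Int × Int × Int × Int)) : Prop := out = shift_max_alt data
instance (data : List Int) (out : List (Int × Int × Int × Int)) : Decidable (Spec_shift_max data out) := by unfold Spec_shift_max; infer_instance

-- ===== CLAIM (what is proved, stated in full; the proofs are below) =====
def Claim_equal_shift_max : Prop := ∀ (data : List Int), Dom_shift_max data → Pre_shift_max data → Spec_shift_max data (shift_max data)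

-- ===== LEMMAS AND PROOFS =====

theorem bl_eq (n : Int) (k : Nat) (h1 : (2^k : Int) ≤ n) (h2 : n < 2^(k+1)) :
    PySem.Int.bitLength n = k + 1 := by
  have hn0 : 0 < n := lt_of_lt_of_le (by positivity) h1
  have hne : n ≠ 0 := by omega
  have h1' : 2^k ≤ n.natAbs := by
    have : ((2^k : Nat) : Int) ≤ n := by push_cast; exact h1
    omega
  have h2' : n.natAbs < 2^(k+1) := by
    have : n < ((2^(k+1) : Nat) : Int) := by push_cast; exact h2
    omega
  have hu := PySem.Int.lt_two_pow_bitLength n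
  have hl := PySem.Int.two_pow_bitLength_le n hne
  have hk1 : k < PySem.Int.bitLength n := by
    by_contra h
    exact absurd (lt_of_le_of_lt h1' hu) (by
      have : (2:Nat)^(PySem.Int.bitLength n) ≤ 2^k := Nat.pow_le_pow_right (by norm_num) (by omega)
      omega)
  have hk2 : PySem.Int.bitLength n - 1 < k + 1 := by
    by_contra h
    exact absurd (lt_of_le_of_lt hl h2') (by
      have : (2:Nat)^(k+1) ≤ 2^(PySem.Int.bitLength n - 1) := Nat.pow_le_pow_right (by norm_num) (by omega)
      omega)
  omega

theorem shr1 (n : Int) : n >>> (1:Nat) = n / 2 := by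
  rw [Int.shiftRight_eq_div_pow]; norm_num

-- A's halving loop computes B's closed form, for every integer pw
theorem sfA_closed (pw : Int) :
    (sfLoopA pw 0 (PySem.List.pyRange 0 8 1)).2 =
      if pw < 256 then 0 else min 7 ((PySem.Int.bitLength pw : Int) - 8) := by
  have hr : PySem.List.pyRange 0 8 1 = [0,1,2,3,4,5,6,7] := by decide
  rw [hr]
  simp only [sfLoopA, shr1]
  split_ifs with h0 h1 h2 h3 h4 h5 h6 h7 <;> simp_all
  · rw [bl_eq pw 8 (by omega) (by omega)]; norm_num
  · rw [bl_eq pw 9 (by omega) (by omega)]; norm_num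
  · rw [bl_eq pw 10 (by omega) (by omega)]; norm_num
  · rw [bl_eq pw 11 (by omega) (by omega)]; norm_num
  · rw [bl_eq pw 12 (by omega) (by omega)]; norm_num
  · rw [bl_eq pw 13 (by omega) (by omega)]; norm_num
  · rw [bl_eq pw 14 (by omega) (by omega)]; norm_num
  · have h15 : (2:Int)^14 ≤ pw := by omega
    have hb : 15 ≤ PySem.Int.bitLength pw := by
      have h1' : 2^14 ≤ pw.natAbs := by
        have : ((2^14 : Nat) : Int) ≤ pw := by push_cast; exact h15
        omega
      have hu := PySem.Int.lt_two_pow_bitLength pw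
      by_contra h
      have : (2:Nat)^(PySem.Int.bitLength pw) ≤ 2^14 := Nat.pow_le_pow_right (by norm_num) (by omega)
      omega
    have : (7:Int) ≤ (PySem.Int.bitLength pw : Int) - 8 := by
      have : (15:Int) ≤ (PySem.Int.bitLength pw : Int) := by exact_mod_cast hb
      omega
    omega

-- the quad A's loop emits at position p (p = 4*i)
def fAt (data : List Int) (sf : Int) (p : Nat) : Int × Int × Int × Int :=
  (data.getD (p+1) 0 >>> sf.toNat, data.getD (p+2) 0 >>> sf.toNat,
   data.getD (p+3) 0 >>> sf.toNat, data.getD p 0)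

theorem stepA_eq (data : List Int) (sf : Int) (d : Nat)
    (buf : List (Int × Int × Int × Int)) (x : Int) :
    quadStepA data sf ((d:Int), buf) x = (((d+4 : Nat) : Int), buf ++ [fAt data sf d]) := by
  have e1 : (d:Int) + 1 = ((d+1 : Nat) : Int) := by push_cast; ring
  have e2 : (d:Int) + 2 = ((d+2 : Nat) : Int) := by push_cast; ring
  have e3 : (d:Int) + 3 = ((d+3 : Nat) : Int) := by push_cast; ring
  simp only [quadStepA, fAt, e1, e2, e3, PySem.List.pyGetD_natCast]
  rw [Prod.mk.injEq]
  exact ⟨by push_cast; ring, rfl⟩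

theorem loopA_spec (data : List Int) (sf : Int) :
    ∀ (l : List Int) (d : Nat) (buf : List (Int × Int × Int × Int)),
      (l.foldl (quadStepA data sf) ((d:Int), buf)).2 =
        buf ++ (List.range l.length).map (fun j => fAt data sf (d + 4*j)) := by
  intro l
  induction l with
  | nil => simp
  | cons x t ih =>
    intro d buf
    rw [List.foldl_cons, stepA_eq, ih (d+4) (buf ++ [fAt data sf d])]
    rw [List.length_cons, List.range_succ_eq_map]
    simp [List.map_map, Function.comp]
    intro j _
    congr 1
    omega

-- data[k::4] is the k-th column: element j is data[k+4j]
theorem slice4 (xs : List Int) (k : Nat) (hk : k ≤ 3) :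
    (PySem.List.slice? xs (some (k:Int)) none 4).getD [] =
      (List.range ((xs.length + 3 - k)/4)).map (fun j => xs.getD (k + 4*j) 0) := by
  rcases Nat.lt_or_ge xs.length k with hlt | hle
  · simp only [PySem.List.slice?, PySem.List.sliceIndices]
    norm_num
    have h1 : ¬ ((k:Int) < 0) := by omega
    have h2 : min (k:Int) xs.length = xs.length := by omega
    simp [h1, h2]
    omega
  · simp only [PySem.List.slice?, PySem.List.sliceIndices]
    norm_num
    have h1 : ¬ ((k:Int) < 0) := by omega
    have h2 : min (k:Int) xs.length = k := by omega
    simp [h1, h2]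
    have hc : (if k < xs.length then (((xs.length:Int) - k + 4 - 1) / 4).toNat else 0)
        = (xs.length + 3 - k)/4 := by
      split_ifs with hklen
      · omega
      · omega
    rw [hc]
    apply List.filterMap_eq_map_iff_forall_eq_some.mpr
    intro j hj
    rw [List.mem_range] at hj
    have hidx : k + 4*j < xs.length := by omega
    have ht : ((k:Int) + 4 * (j:Int)).toNat = k + 4*j := by omega
    rw [ht, List.getElem?_eq_getElem hidx]
    simp

theorem zip_map_range {α β : Type} (f : Nat → α) (g : Nat → β) (n m : Nat) :
    (((List.range n).map f).zip ((List.range m).map g)) =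
      (List.range (min n m)).map (fun j => (f j, g j)) := by
  apply List.ext_getElem
  · simp
  · intro i h1 h2
    simp

theorem loopA_spec0 (data : List Int) (sf : Int) (l : List Int) :
    (l.foldl (quadStepA data sf) (0, [])).2 =
      (List.range l.length).map (fun j => fAt data sf (4*j)) := by
  have h := loopA_spec data sf l 0 []
  simpa using h

-- ===== VERDICT (by name: the statement is the Claim_ definition above) =====
theorem shift_max_spec : Claim_equal_shift_max := by
  intro data _ _
  unfold Spec_shift_max shift_max shift_max_alt
  dsimp only
  rw [sfA_closed]
  set pw := (PySem.List.max? data (fun x => x)).getD 0 with hpw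
  set sf : Int := if pw < 256 then 0 else min 7 ((PySem.Int.bitLength pw : Int) - 8) with hsf
  -- A side: the quad loop is a map over range (len // 4)
  have hflo : PySem.Int.floordiv (data.length : Int) 4 = ((data.length / 4 : Nat) : Int) := by
    exact_mod_cast PySem.Int.floordiv_natCast data.length 4
  rw [hflo, PySem.List.pyRange_zero_natCast, loopA_spec0]
  -- B side: the four column slices
  have s0 := slice4 data 0 (by norm_num)
  have s1 := slice4 data 1 (by norm_num)
  have s2 := slice4 data 2 (by norm_num)
  have s3 := slice4 data 3 (by norm_num)
  norm_num at s0 s1 s2 s3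
  rw [s0, s1, s2, s3]
  rw [zip_map_range, zip_map_range, zip_map_range]
  rw [List.map_map]
  have hq : min ((data.length + 2)/4) (min ((data.length + 3 - 2)/4)
      (min (data.length/4) ((data.length + 3)/4))) = data.length / 4 := by omega
  rw [hq]
  simp only [List.length_map, List.length_range]
  apply List.map_congr_left
  intro j hj
  simp only [Function.comp, fAt]
  have e1 : 4*j + 1 = 1 + 4*j := by omega
  have e2 : 4*j + 2 = 2 + 4*j := by omega
  have e3 : 4*j + 3 = 3 + 4*j := by omega
  rw [e1, e2, e3]
  simp [List.getD]
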